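-- pv_equiv track=rewrite | github.com/AlJohri/practice | codility/PrefixSet.py | slow_solution
-- ===== SOURCE A (Python) =====
-- def slow_solution(A):
--     num_unique_values = len(set(A))
--
--     values_thus_far = []
--     num_unique_values_thus_far = 0
--
--     for i, number in enumerate(A):
--         if number not in values_thus_far:
--             values_thus_far.append(number)
--             num_unique_values_thus_far += 1
--
--         if num_unique_values_thus_far == num_unique_values:
--             return i
-- ===== SOURCE B (Python) =====
-- def slow_solution(A):
--     seen = set()
--     best = None
--     for i, v in enumerate(A):
--         if v not in seen:
--             seen.add(v)
--             best = i
--     return best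
-- ===== Notes on version B (the rewrite author's own statement) =====
-- stated objective: faster
-- what changed: B replaces A's precomputed unique-count plus quadratic running-list membership scan with early return by a single pass over the list tracking in a set the last index where a previously unseen value appears, returned at the end.
import Mathlib
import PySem

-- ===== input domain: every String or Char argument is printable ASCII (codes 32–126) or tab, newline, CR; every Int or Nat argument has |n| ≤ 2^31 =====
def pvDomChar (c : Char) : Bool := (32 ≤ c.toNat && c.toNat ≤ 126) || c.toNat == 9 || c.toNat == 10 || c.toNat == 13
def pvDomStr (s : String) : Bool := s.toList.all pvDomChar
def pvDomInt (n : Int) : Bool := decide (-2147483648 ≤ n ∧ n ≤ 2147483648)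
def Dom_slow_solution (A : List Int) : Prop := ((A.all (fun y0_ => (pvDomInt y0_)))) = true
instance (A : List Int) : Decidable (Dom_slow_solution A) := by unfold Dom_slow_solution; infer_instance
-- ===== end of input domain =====

-- B replaces A's precomputed-unique-count scan (quadratic list membership, early return)
-- by one pass recording the last index at which a new value appears; return values proved equal.

-- ===== PORT A =====
-- the for-loop of A: state = (values_thus_far, num_unique_values_thus_far); early return = some i
def aLoop (target : Int) : List (Int × Int) → List Int → Int → Option Int
  | [], _, _ => none
  | (i, n) :: rest, seen, cnt =>
    let seen' := if n ∉ seen then seen ++ [n] else seen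
    let cnt'  := if n ∉ seen then cnt + 1 else cnt
    if cnt' = target then some i else aLoop target rest seen' cnt'

def slow_solution (A : List Int) : Option Int :=
  aLoop ((PySem.Set.ofList A).length : Int) (PySem.List.enumerate A) [] 0

-- ===== PORT B =====
-- the loop body of B: state = (seen, best)
def bStep (st : PySem.Set Int × Option Int) (p : Int × Int) : PySem.Set Int × Option Int :=
  if p.2 ∈ st.1 then st else (PySem.Set.add st.1 p.2, some p.1)

def slow_solution_alt (A : List Int) : Option Int :=
  ((PySem.List.enumerate A).foldl bStep ((PySem.Set.empty : PySem.Set Int), (none : Option Int))).2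

-- ===== PRECONDITION & SPEC =====
def Spec_slow_solution (A : List Int) (out : Option Int) : Prop := out = slow_solution_alt A
instance (A : List Int) (out : Option Int) : Decidable (Spec_slow_solution A out) := by unfold Spec_slow_solution; infer_instance

-- ===== CLAIM (what is proved, stated in full; the proofs are below) =====
def Claim_equal_slow_solution : Prop := ∀ (A : List Int), Dom_slow_solution A → Spec_slow_solution A (slow_solution A)

-- ===== LEMMAS AND PROOFS =====

-- B's loop keeps seen = s0 updated with the processed values, whatever the index components are
lemma bFold_fst (l : List (Int × Int)) (s0 : PySem.Set Int) (b0 : Option Int) :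
    (l.foldl bStep (s0, b0)).1 = PySem.Set.update s0 (l.map Prod.snd) := by
  induction l generalizing s0 b0 with
  | nil => simp [PySem.Set.update_nil]
  | cons p rest ih =>
    simp only [List.foldl_cons, List.map_cons, PySem.Set.update_cons, bStep]
    by_cases h : p.2 ∈ s0
    · rw [if_pos h, PySem.Set.add_of_mem h]; exact ih _ _
    · rw [if_neg h]; exact ih _ _

lemma length_le_length_update (s : PySem.Set Int) (xs : List Int) :
    s.length ≤ (PySem.Set.update s xs).length := by
  rw [PySem.Set.update_eq_append_filter]; simp

lemma length_add (s : PySem.Set Int) (x : Int) :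
    (PySem.Set.add s x).length = if x ∈ s then s.length else s.length + 1 := by
  rw [PySem.Set.add_eq_ite]
  by_cases h : x ∈ s <;> simp [h]

lemma seen_step (seen : List Int) (n : Int) :
    (if n ∉ seen then seen ++ [n] else seen) = PySem.Set.add seen n := by
  rw [PySem.Set.add_eq_ite]
  by_cases h : n ∈ seen <;> simp [h]

-- once A's loop has returned, appending further elements changes nothing
lemma aLoop_append_of_some (t : Int) (l1 l2 : List (Int × Int)) (seen : List Int) (cnt : Int)
    (i : Int) (h : aLoop t l1 seen cnt = some i) :
    aLoop t (l1 ++ l2) seen cnt = some i := by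
  induction l1 generalizing seen cnt with
  | nil => simp [aLoop] at h
  | cons p rest ih =>
    obtain ⟨j, n⟩ := p
    simp only [aLoop, List.cons_append] at h ⊢
    by_cases hc : (if n ∉ seen then cnt + 1 else cnt) = t
    · rw [if_pos hc] at h ⊢; exact h
    · rw [if_neg hc] at h ⊢; exact ih _ _ h

-- if the target is reachable within l, A's loop returns some index
lemma aLoop_hits (l : List (Int × Int)) (seen : List Int) (cnt t : Int)
    (hc : cnt = (seen.length : Int)) (hlt : cnt < t)
    (hle : t ≤ ((PySem.Set.update seen (l.map Prod.snd)).length : Int)) :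
    ∃ i, aLoop t l seen cnt = some i := by
  induction l generalizing seen cnt with
  | nil =>
    exfalso; rw [List.map_nil, PySem.Set.update_nil] at hle; omega
  | cons p rest ih =>
    obtain ⟨j, n⟩ := p
    simp only [aLoop]
    by_cases ht : (if n ∉ seen then cnt + 1 else cnt) = t
    · exact ⟨j, by rw [if_pos ht]⟩
    · rw [if_neg ht, seen_step]
      simp only [List.map_cons, PySem.Set.update_cons] at hle
      have hadd := length_add seen n
      by_cases h : n ∈ seen <;> simp only [h, if_true, if_false, not_true, not_false_iff] at hadd ht ⊢
      · rw [PySem.Set.add_of_mem h] at hle ⊢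
        exact ih seen cnt hc hlt hle
      · exact ih (PySem.Set.add seen n) (cnt + 1) (by omega) (by omega) hle

-- processing l then a fresh value x with target = distinct count + 1 returns x's index
lemma aLoop_fresh_last (l : List (Int × Int)) (seen : List Int) (cnt t j x : Int)
    (hc : cnt = (seen.length : Int)) (hx1 : x ∉ seen) (hx2 : x ∉ l.map Prod.snd)
    (ht : t = ((PySem.Set.update seen (l.map Prod.snd)).length : Int) + 1) :
    aLoop t (l ++ [(j, x)]) seen cnt = some j := by
  induction l generalizing seen cnt with
  | nil =>
    rw [List.map_nil, PySem.Set.update_nil] at ht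
    simp only [List.nil_append, aLoop, if_pos hx1]
    rw [if_pos (by omega)]
  | cons p rest ih =>
    obtain ⟨i, n⟩ := p
    simp only [List.cons_append, aLoop]
    simp only [List.map_cons, PySem.Set.update_cons] at ht
    have hadd := length_add seen n
    have hmono := length_le_length_update (PySem.Set.add seen n) (rest.map Prod.snd)
    have hxn : x ≠ n := fun h => hx2 (by simp [h])
    have hx2' : x ∉ rest.map Prod.snd := by
      simp only [List.map_cons] at hx2; exact fun h => hx2 (List.mem_cons_of_mem _ h)
    have hx1' : x ∉ PySem.Set.add seen n := by
      rw [PySem.Set.mem_add]; rintro (h | h); exact hx1 h; exact hxn h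
    have hcnt' : (if n ∉ seen then cnt + 1 else cnt) = ((PySem.Set.add seen n).length : Int) := by
      by_cases h : n ∈ seen <;> simp only [h, if_true, if_false, not_true, not_false_iff] at hadd ⊢ <;> omega
    rw [hcnt', seen_step, if_neg (by omega)]
    exact ih (PySem.Set.add seen n) _ rfl hx1' hx2' ht

lemma main_eq (A : List Int) : slow_solution A = slow_solution_alt A := by
  induction A using List.reverseRecOn with
  | nil => rfl
  | append_singleton B x ih =>
    have henum : PySem.List.enumerate (B ++ [x]) 0
        = PySem.List.enumerate B 0 ++ [((B.length : Int), x)] := by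
      rw [PySem.List.enumerate_append]
      simp [PySem.List.enumerate_cons, PySem.List.enumerate_nil]
    have hseenB : ((PySem.List.enumerate B 0).foldl bStep
        ((PySem.Set.empty : PySem.Set Int), (none : Option Int))).1 = PySem.Set.ofList B := by
      rw [bFold_fst, PySem.List.map_snd_enumerate]
      exact PySem.Set.update_nil_left B
    have hofl : PySem.Set.ofList (B ++ [x]) = PySem.Set.add (PySem.Set.ofList B) x :=
      PySem.Set.ofList_append_singleton B x
    unfold slow_solution slow_solution_alt at ih ⊢
    rw [henum, List.foldl_append, List.foldl_cons, List.foldl_nil]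
    by_cases hx : x ∈ B
    · -- x already occurs: target unchanged, both sides unchanged
      have hxo : x ∈ PySem.Set.ofList B := (PySem.Set.mem_ofList B x).mpr hx
      have hBne : 0 < (PySem.Set.ofList B).length := List.length_pos_of_mem hxo
      obtain ⟨i, hi⟩ := aLoop_hits (PySem.List.enumerate B 0) [] 0
        (((PySem.Set.ofList B).length : Nat) : Int) (by simp) (by exact_mod_cast hBne)
        (by rw [PySem.List.map_snd_enumerate, PySem.Set.update_nil_left])
      rw [show ((PySem.Set.ofList (B ++ [x])).length : Int)
            = ((PySem.Set.ofList B).length : Int) by rw [hofl, PySem.Set.add_of_mem hxo]]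
      rw [aLoop_append_of_some _ _ _ _ _ i hi]
      simp only [bStep]
      rw [if_pos (by rw [hseenB]; exact hxo)]
      rw [← hi]; exact ih
    · -- x is new: A returns index B.length at the appended element, B records it as best
      have hxo : x ∉ PySem.Set.ofList B := fun h => hx ((PySem.Set.mem_ofList B x).mp h)
      have htgt : ((PySem.Set.ofList (B ++ [x])).length : Int)
          = ((PySem.Set.ofList B).length : Int) + 1 := by
        rw [hofl, PySem.Set.add_of_not_mem hxo]; simp
      rw [aLoop_fresh_last (PySem.List.enumerate B 0) [] 0 _ _ x rfl
        (by simp) (by rw [PySem.List.map_snd_enumerate]; exact hx)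
        (by rw [PySem.List.map_snd_enumerate, PySem.Set.update_nil_left, ← htgt])]
      simp only [bStep]
      rw [if_neg (by rw [hseenB]; exact hxo)]

-- ===== VERDICT (by name: the statement is the Claim_ definition above) =====
theorem slow_solution_spec : Claim_equal_slow_solution := by
  intro A _
  exact main_eq A
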